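-- pv_equiv track=rewrite | github.com/glory0224/Algorithm | SWEA/D3/tenes_special_prime.py | find_prime_digit
-- ===== SOURCE A (Python) =====
-- def eratos_prime(n):
--
--     is_prime = [True] * (n + 1)
--
--     # 0과 1은 소수가 아니므로 제외
--     is_prime[0] = is_prime[0] = False
--
--
--     p = 2
--
--     while p * p <= n: # 제곱이 n을 넘어가지 않는 범위 내
--         if is_prime[p]: # 소수인 경우
--             for i in range(p*p, n+1, p):
--                 is_prime[i] = False
--
--         p += 1
--
--     primes = [i for i in range(n+1) if is_prime[i]]
--
--     return primes
--
-- def find_prime_digit(D, A, B):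
--     # B가 최대 범위이므로 B까지의 소수를 판별
--     primes = eratos_prime(B)
--
--     # D가 포함되는 소수 개수
--     cnt = 0
--
--     for prime in primes:
--         if prime < A: # A의 범위보다 작은 경우는 pass
--             continue
--
--         if str(D) in str(prime):
--             cnt += 1
--
--     return cnt
-- ===== SOURCE B (Python) =====
-- def find_prime_digit(D, A, B):
--     # Trial-division primality; counts n in [A, B] that are prime and contain digit D.
--     # Primes are >= 2, so the scan starts at max(A, 2).
--     # (Unlike A's buggy sieve, 1 is correctly not counted as prime.)
--     def is_prime(n):
--         if n < 2:
--             return False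
--         d = 2
--         while d * d <= n:
--             if n % d == 0:
--                 return False
--             d += 1
--         return True
--     s = str(D)
--     return sum(1 for n in range(max(A, 2), B + 1) if is_prime(n) and s in str(n))
-- ===== Notes on version B (the rewrite author's own statement) =====
-- stated objective: simpler
-- what changed: Replaced the Eratosthenes sieve (boolean table + prime-list pass + skip loop over [0,B]) by a single pass over [max(A,2),B] with a trial-division primality test, summing matches directly; B also fixes A's sieve bug that counts 1 as prime (A's line `is_prime[0] = is_prime[0] = False` never clears index 1).
-- intended difference: On inputs with D = 1 and A <= 1 <= B, A counts the non-prime 1 (its sieve never marks index 1 non-prime, a chained-assignment typo), returning one more than B; B's count, which excludes 1, is the intended number of primes in [A,B] containing digit 1. — e.g. on find_prime_digit(1, 1, 1): A returns 1, B returns 0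
import Mathlib
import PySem

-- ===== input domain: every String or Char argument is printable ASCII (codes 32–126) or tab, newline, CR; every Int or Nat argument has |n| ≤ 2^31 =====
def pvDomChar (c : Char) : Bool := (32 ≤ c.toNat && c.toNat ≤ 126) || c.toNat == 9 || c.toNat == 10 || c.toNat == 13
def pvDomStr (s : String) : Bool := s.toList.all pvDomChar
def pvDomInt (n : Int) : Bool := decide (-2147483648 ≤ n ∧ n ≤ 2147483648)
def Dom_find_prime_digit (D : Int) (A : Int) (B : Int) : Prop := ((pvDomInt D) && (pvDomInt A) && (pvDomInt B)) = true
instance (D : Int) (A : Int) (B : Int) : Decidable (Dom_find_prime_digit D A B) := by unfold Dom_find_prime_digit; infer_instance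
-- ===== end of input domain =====

-- B replaces A's sieve by a one-pass trial-division count over [A,B] (simpler; not faster), and
-- does not count 1 as prime where A's sieve bug does (see D_ below).

-- ===== PORT A =====
-- inner 'for i in range(p*p, n+1, p): is_prime[i] = False'
-- the Python list is ported as Array Bool so the port evaluates fast; every written index i
-- satisfies 0 ≤ p*p ≤ i < n+1 = size where Python writes, so set/get at i.toNat is exact there
def pvMark (n : Int) (arr : Array Bool) (p : Int) : Array Bool :=
  (PySem.List.pyRange (p * p) (n + 1) p).foldl (fun acc i => acc.setIfInBounds i.toNat false) arr

-- 'while p*p <= n' loop; fuel = (n+1-p).toNat bounds the number of iterations exactly, so the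
-- structural recursion mirrors the while loop step for step ('is_prime[p]' is in range when the
-- guard holds, so getD at p.toNat with default false is exact there).
def pvSieveLoop (n : Int) : Nat → Array Bool → Int → Array Bool
  | 0, a, _ => a
  | k + 1, a, p =>
    if p * p ≤ n then
      pvSieveLoop n k (if a.getD p.toNat false then pvMark n a p else a) (p + 1)
    else a

def eratos_prime (n : Int) : List Int :=
  let isp0 := Array.replicate (n + 1).toNat true
  let isp1 := isp0.setIfInBounds 0 false              -- is_prime[0] = is_prime[0] = False
  let isp := pvSieveLoop n (n + 1 - 2).toNat isp1 2
  (PySem.List.pyRange 0 (n + 1) 1).filter (fun i => isp.getD i.toNat false)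

def find_prime_digit (D : Int) (A : Int) (B : Int) : Int :=
  (eratos_prime B).foldl
    (fun cnt prime =>
      if prime < A then cnt
      else if PySem.Str.isIn (PySem.Int.toStr D) (PySem.Int.toStr prime) then cnt + 1
      else cnt) 0

-- ===== PORT B =====
-- trial-division loop 'while d*d <= n'; fuel = (n+1-d).toNat bounds the iterations exactly
def pvTrialLoop (n : Int) : Nat → Int → Bool
  | 0, _ => true
  | k + 1, d =>
    if d * d ≤ n then
      if PySem.Int.mod n d == 0 then false else pvTrialLoop n k (d + 1)
    else true

def pvIsPrime (n : Int) : Bool :=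
  if n < 2 then false else pvTrialLoop n (n + 1 - 2).toNat 2

def find_prime_digit_alt (D : Int) (A : Int) (B : Int) : Int :=
  let s := PySem.Int.toStr D
  (PySem.List.pyRange (max A 2) (B + 1) 1).foldl
    (fun acc n => if pvIsPrime n && PySem.Str.isIn s (PySem.Int.toStr n) then acc + 1 else acc) 0

-- ===== PRECONDITION & SPEC =====
-- Pre_ excludes exactly B < 0, where A raises IndexError (its sieve list [True]*(B+1) is empty
-- or the range is degenerate and 'is_prime[0] = False' fails).
def Pre_find_prime_digit (D : Int) (A : Int) (B : Int) : Prop := 0 ≤ B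
instance (D : Int) (A : Int) (B : Int) : Decidable (Pre_find_prime_digit D A B) := by unfold Pre_find_prime_digit; infer_instance
def pvWitness_find_prime_digit : Int × Int × Int := (1, 2, 20)

-- On inputs with D = 1 and A ≤ 1 ≤ B, A counts the non-prime 1 (its sieve never marks index 1,
-- a chained-assignment typo) and returns one more than B; B's value, excluding 1, is intended.
def D_find_prime_digit (D : Int) (A : Int) (B : Int) : Prop := D = 1 ∧ A ≤ 1 ∧ 1 ≤ B
instance (D : Int) (A : Int) (B : Int) : Decidable (D_find_prime_digit D A B) := by unfold D_find_prime_digit; infer_instance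

def Spec_find_prime_digit (D : Int) (A : Int) (B : Int) (out : Int) : Prop :=
  ¬ D_find_prime_digit D A B → out = find_prime_digit_alt D A B
instance (D : Int) (A : Int) (B : Int) (out : Int) : Decidable (Spec_find_prime_digit D A B out) := by unfold Spec_find_prime_digit; infer_instance

def pvDiffWitness_find_prime_digit : Int × Int × Int := (1, 1, 1)
def pvDiffWitnessOut_find_prime_digit : Int × Int := (1, 0)

-- ===== CLAIM (what is proved, stated in full; the proofs are below) =====
def Claim_unchanged_find_prime_digit : Prop := ∀ (D : Int) (A : Int) (B : Int), Dom_find_prime_digit D A B → Pre_find_prime_digit D A B → Spec_find_prime_digit D A B (find_prime_digit D A B)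
def Claim_changed_find_prime_digit : Prop := Dom_find_prime_digit (pvDiffWitness_find_prime_digit.1) (pvDiffWitness_find_prime_digit.2.1) (pvDiffWitness_find_prime_digit.2.2) ∧ Pre_find_prime_digit (pvDiffWitness_find_prime_digit.1) (pvDiffWitness_find_prime_digit.2.1) (pvDiffWitness_find_prime_digit.2.2) ∧ D_find_prime_digit (pvDiffWitness_find_prime_digit.1) (pvDiffWitness_find_prime_digit.2.1) (pvDiffWitness_find_prime_digit.2.2) ∧ find_prime_digit (pvDiffWitness_find_prime_digit.1) (pvDiffWitness_find_prime_digit.2.1) (pvDiffWitness_find_prime_digit.2.2) = pvDiffWitnessOut_find_prime_digit.1 ∧ find_prime_digit_alt (pvDiffWitness_find_prime_digit.1) (pvDiffWitness_find_prime_digit.2.1) (pvDiffWitness_find_prime_digit.2.2) = pvDiffWitnessOut_find_prime_digit.2 ∧ pvDiffWitnessOut_find_prime_digit.1 ≠ pvDiffWitnessOut_find_prime_digit.2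
def Claim_exact_find_prime_digit : Prop := ∀ (D : Int) (A : Int) (B : Int), Dom_find_prime_digit D A B → Pre_find_prime_digit D A B → D_find_prime_digit D A B → find_prime_digit D A B ≠ find_prime_digit_alt D A B
-- ===== LEMMAS AND PROOFS =====

theorem pv_set_getD (a : Array Bool) (m j : Nat) :
    (a.setIfInBounds m false).getD j false = if j = m then false else a.getD j false := by
  rcases eq_or_ne j m with rfl|h
  · simp [Array.getD_eq_getD_getElem?, Array.getElem?_setIfInBounds]
    rcases Nat.lt_or_ge j a.size with h2|h2
    · simp [h2]
    · simp [Nat.not_lt.2 h2]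
  · simp [Array.getD_eq_getD_getElem?, Ne.symm h, h]
theorem pv_foldl_set_getD (is : List Int) (h : ∀ i ∈ is, 0 ≤ i) (a : Array Bool) (j : Nat) :
    (is.foldl (fun acc i => acc.setIfInBounds i.toNat false) a).getD j false
      = if (j : Int) ∈ is then false else a.getD j false := by
  induction is generalizing a with
  | nil => simp
  | cons i t ih =>
    simp only [List.foldl_cons]
    rw [ih (fun x hx => h x (List.mem_cons_of_mem _ hx)), pv_set_getD]
    have hi0 : 0 ≤ i := h i (List.mem_cons_self ..)
    by_cases hm : (j : Int) ∈ t
    · simp [hm]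
    · by_cases hji : (j : Int) = i
      · subst hji
        simp [hm]
      · simp [hm, hji, show ¬ j = i.toNat by omega]
theorem pv_foldl_set_size (is : List Int) (a : Array Bool) :
    (is.foldl (fun acc i => acc.setIfInBounds i.toNat false) a).size = a.size := by
  induction is generalizing a with
  | nil => rfl
  | cons i t ih => simp [List.foldl_cons, ih, Array.size_setIfInBounds]

theorem pvMark_size (n : Int) (a : Array Bool) (p : Int) : (pvMark n a p).size = a.size :=
  pv_foldl_set_size _ _

theorem pvMark_getD (n : Int) (a : Array Bool) (p : Int) (hp : 0 < p) (j : Nat) :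
    (pvMark n a p).getD j false
      = if p * p ≤ (j : Int) ∧ (j : Int) ≤ n ∧ p ∣ (j : Int) then false else a.getD j false := by
  unfold pvMark
  rw [pv_foldl_set_getD _ (fun i hi => by
    have := (PySem.List.mem_pyRange_iff_of_pos hp i).1 hi
    nlinarith [this.1])]
  have hmem := PySem.List.mem_pyRange_iff_of_pos (a := p * p) (b := n + 1) hp (j : Int)
  by_cases hc : p * p ≤ (j : Int) ∧ (j : Int) ≤ n ∧ p ∣ (j : Int)
  · rw [if_pos hc, if_pos]
    rw [hmem]
    refine ⟨hc.1, by omega, ?_⟩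
    exact dvd_sub hc.2.2 (Dvd.intro p rfl)
  · rw [if_neg hc, if_neg]
    rw [hmem]
    rintro ⟨h1, h2, h3⟩
    exact hc ⟨h1, by omega, by
      have : p ∣ (j : Int) - p * p + p * p := dvd_add h3 (Dvd.intro p rfl)
      simpa using this⟩
theorem pvSieveLoop_false (n : Int) : ∀ (k : Nat) (l : Array Bool) (p : Int) (j : Nat), 0 < p →
    l.getD j false = false → (pvSieveLoop n k l p).getD j false = false := by
  intro k
  induction k with
  | zero => intro l p j _ h; exact h
  | succ k ih =>
    intro l p j hp h
    simp only [pvSieveLoop]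
    split
    · refine ih _ _ _ (by omega) ?_
      split
      · rw [pvMark_getD _ _ _ hp]
        split
        · rfl
        · exact h
      · exact h
    · exact h

theorem pv_good_nd (p : Int) (j : Nat) (hp : 2 ≤ p) (hg : j = 1 ∨ Nat.Prime j) :
    ¬ (p * p ≤ (j : Int) ∧ p ∣ (j : Int)) := by
  rintro ⟨h1, h2⟩
  rcases hg with rfl | hprime
  · have := Int.le_of_dvd one_pos h2
    omega
  · have hpq : ((p.toNat : Int)) = p := by omega
    rw [← hpq] at h2
    have hdvd : p.toNat ∣ j := Int.natCast_dvd_natCast.mp h2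
    rcases hprime.eq_one_or_self_of_dvd _ hdvd with h | h
    · omega
    · have h2le := hprime.two_le
      rw [← hpq, h] at h1
      have h2le' : (2 : Int) ≤ (j : Int) := by exact_mod_cast h2le
      nlinarith

theorem pvSieveLoop_good (n : Int) : ∀ (k : Nat) (l : Array Bool) (p : Int) (j : Nat), 2 ≤ p →
    (j = 1 ∨ Nat.Prime j) → (pvSieveLoop n k l p).getD j false = l.getD j false := by
  intro k
  induction k with
  | zero => intro l p j _ _; rfl
  | succ k ih =>
    intro l p j hp hg
    simp only [pvSieveLoop]
    split
    · rw [ih _ _ _ (by omega) hg]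
      split
      · rw [pvMark_getD _ _ _ (by omega)]
        rw [if_neg (fun hc => pv_good_nd p j hp hg ⟨hc.1, hc.2.2⟩)]
      · rfl
    · rfl

def pvI1 (l : Array Bool) : Prop :=
  ∀ j : Nat, j < l.size → l.getD j false = false → j = 0 ∨ ∃ q : Nat, 2 ≤ q ∧ q * q ≤ j ∧ q ∣ j

theorem pvI1_mark (n : Int) (l : Array Bool) (p : Int) (hp : 2 ≤ p) (h : pvI1 l) :
    pvI1 (pvMark n l p) := by
  intro j hj hf
  rw [pvMark_size] at hj
  rw [pvMark_getD _ _ _ (by omega)] at hf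
  by_cases hc : p * p ≤ (j : Int) ∧ (j : Int) ≤ n ∧ p ∣ (j : Int)
  · right
    have hpq : ((p.toNat : Int)) = p := by omega
    refine ⟨p.toNat, by omega, ?_, ?_⟩
    · have h1 := hc.1; rw [← hpq] at h1; exact_mod_cast h1
    · have h3 := hc.2.2; rw [← hpq] at h3; exact_mod_cast h3
  · rw [if_neg hc] at hf
    exact h j hj hf
theorem pvSieveLoop_marks (n : Int) : ∀ (k : Nat) (p : Int) (l : Array Bool), 2 ≤ p → pvI1 l →
    ((l.size : Int) = n + 1) → (n + 1 - p).toNat ≤ k → ∀ r j : Nat, p ≤ (r : Int) →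
    Nat.Prime r → ((r : Int) * (r : Int) ≤ n) → r ∣ j → r * r ≤ j → ((j : Int) ≤ n) →
    (pvSieveLoop n k l p).getD j false = false := by
  intro k
  induction k with
  | zero =>
    intro p l hp _ _ hfuel r j hpr hr hrn _ _ _
    exfalso
    have : (r : Int) ≤ (r : Int) * (r : Int) := by nlinarith
    omega
  | succ k ih =>
    intro p l hp hI hlen hfuel r j hpr hr hrn hdvd hjr hjn
    simp only [pvSieveLoop]
    by_cases hg : p * p ≤ n
    · rw [if_pos hg]
      have hpn : p ≤ n := by nlinarith
      by_cases hpreq : p = (r : Int)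
      · -- the loop is at p = r: the guard reads true (r is prime, so unmarked), and marking kills j
        have hrlen : r < l.size := by
          have : (r : Int) ≤ n := by nlinarith
          omega
        have hget : l.getD r false = true := by
          cases hgd : l.getD r false with
          | true => rfl
          | false =>
            exfalso
            rcases hI r hrlen hgd with h0 | ⟨q, hq2, hqq, hqd⟩
            · have := hr.two_le; omega
            · rcases hr.eq_one_or_self_of_dvd _ hqd with h | h
              · omega
              · subst h; nlinarith [hr.two_le]
        have hguard : l.getD p.toNat false = true := by
          have : p.toNat = r := by omega
          rw [this]; exact hget
        rw [hguard]
        simp only [if_pos]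
        refine pvSieveLoop_false n k _ (p + 1) j (by omega) ?_
        have hc1 : p * p ≤ (j : Int) := by rw [hpreq]; exact_mod_cast hjr
        have hc2 : p ∣ (j : Int) := by rw [hpreq]; exact_mod_cast hdvd
        rw [pvMark_getD _ _ _ (by omega), if_pos ⟨hc1, hjn, hc2⟩]
      · -- p < r: step to p+1
        have hstep : ∀ l' : Array Bool, pvI1 l' → ((l'.size : Int) = n + 1) →
            (pvSieveLoop n k l' (p + 1)).getD j false = false := by
          intro l' hI' hlen'
          exact ih (p + 1) l' (by omega) hI' hlen' (by omega) r j (by omega) hr hrn hdvd hjr hjn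
        split
        · exact hstep _ (pvI1_mark n l p hp hI) (by rw [pvMark_size]; exact hlen)
        · exact hstep _ hI hlen
    · exfalso
      have : p * p ≤ (r : Int) * (r : Int) := by nlinarith
      omega
theorem pv_init_I1 (n : Int) :
    pvI1 ((Array.replicate (n + 1).toNat true).setIfInBounds 0 false) := by
  intro j hj hf
  rcases Nat.eq_zero_or_pos j with rfl | hpos
  · exact Or.inl rfl
  · exfalso
    rw [pv_set_getD, if_neg (by omega)] at hf
    simp only [Array.size_setIfInBounds, Array.size_replicate] at hj
    rw [Array.getD_eq_getD_getElem?, Array.getElem?_replicate, if_pos hj] at hf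
    simp at hf

theorem pvSieve_char (n : Int) (hn : 0 ≤ n) (j : Nat) (hj : (j : Int) ≤ n) :
    (pvSieveLoop n (n + 1 - 2).toNat
        ((Array.replicate (n + 1).toNat true).setIfInBounds 0 false) 2).getD j false
      = decide (j = 1 ∨ Nat.Prime j) := by
  have hgetD : ∀ j' : Nat, j' < (n + 1).toNat →
      ((Array.replicate (n + 1).toNat true).setIfInBounds 0 false).getD j' false
        = if j' = 0 then false else true := by
    intro j' hj'
    rw [pv_set_getD]
    rcases eq_or_ne j' 0 with rfl | h
    · simp
    · rw [if_neg h, if_neg h, Array.getD_eq_getD_getElem?, Array.getElem?_replicate, if_pos hj']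
      rfl
  have hlen0 : ((((Array.replicate (n + 1).toNat true).setIfInBounds 0 false).size : Int)) = n + 1 := by
    simp only [Array.size_setIfInBounds, Array.size_replicate]
    omega
  by_cases hgood : j = 1 ∨ Nat.Prime j
  · have hj0 : j ≠ 0 := by
      rcases hgood with rfl | h
      · omega
      · have := h.two_le; omega
    rw [pvSieveLoop_good n _ _ _ _ (by norm_num) hgood, hgetD j (by omega), if_neg hj0,
      decide_eq_true hgood]
  · rw [decide_eq_false hgood]
    rcases Nat.eq_zero_or_pos j with rfl | hpos
    · exact pvSieveLoop_false n _ _ _ _ (by norm_num) (by rw [hgetD 0 (by omega)]; rfl)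
    · have hj1 : j ≠ 1 := fun h => hgood (Or.inl h)
      have hjnp : ¬ Nat.Prime j := fun h => hgood (Or.inr h)
      have hr : Nat.Prime j.minFac := Nat.minFac_prime hj1
      have hrr : j.minFac * j.minFac ≤ j := by
        have := Nat.minFac_sq_le_self hpos hjnp
        nlinarith
      refine pvSieveLoop_marks n _ 2 _ (by norm_num) (pv_init_I1 n) hlen0 le_rfl j.minFac j
        ?_ hr ?_ (Nat.minFac_dvd j) hrr hj
      · exact_mod_cast hr.two_le
      · have h1 : ((j.minFac * j.minFac : Nat) : Int) ≤ (j : Int) := by exact_mod_cast hrr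
        push_cast at h1
        omega
theorem pvTrialLoop_iff (n : Int) : ∀ (k : Nat) (d : Int), 2 ≤ d → (n + 1 - d).toNat ≤ k →
    (pvTrialLoop n k d = true ↔ ∀ e : Int, d ≤ e → e * e ≤ n → ¬ e ∣ n) := by
  intro k
  induction k with
  | zero =>
    intro d hd hfuel
    simp only [pvTrialLoop, true_iff]
    intro e he hee _
    have : e ≤ e * e := by nlinarith
    omega
  | succ k ih =>
    intro d hd hfuel
    simp only [pvTrialLoop]
    by_cases hg : d * d ≤ n
    · have hdn : d ≤ n := by nlinarith
      rw [if_pos hg]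
      by_cases hdvd : d ∣ n
      · rw [if_pos (beq_iff_eq.mpr ((PySem.Int.mod_eq_zero_iff_dvd n d).mpr hdvd))]
        constructor
        · intro h; exact absurd h (by simp)
        · intro h; exact absurd hdvd (h d le_rfl hg)
      · rw [if_neg (fun h => hdvd ((PySem.Int.mod_eq_zero_iff_dvd n d).mp (beq_iff_eq.mp h)))]
        rw [ih (d + 1) (by omega) (by omega)]
        constructor
        · intro h e he hee
          rcases eq_or_lt_of_le he with rfl | hlt
          · exact fun hc => hdvd hc
          · exact h e (by omega) hee
        · intro h e he hee
          exact h e (by omega) hee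
    · rw [if_neg hg]
      simp only [true_iff]
      intro e he hee _
      have : d * d ≤ e * e := by nlinarith
      omega

theorem pvIsPrime_iff (i : Int) (h2 : 2 ≤ i) : (pvIsPrime i = true ↔ Nat.Prime i.toNat) := by
  have hti : ((i.toNat : Int)) = i := by omega
  unfold pvIsPrime
  rw [if_neg (by omega), pvTrialLoop_iff i _ 2 (by norm_num) le_rfl]
  constructor
  · intro h
    rw [Nat.prime_def_le_sqrt]
    refine ⟨by omega, fun m hm hms hdvd => ?_⟩
    have hmm : m * m ≤ i.toNat := Nat.le_sqrt.mp hms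
    refine h (m : Int) (by exact_mod_cast hm) ?_ ?_
    · rw [← hti]; exact_mod_cast hmm
    · rw [← hti]; exact_mod_cast hdvd
  · intro hp e he hee hed
    have he0 : (0 : Int) ≤ e := by omega
    have hdvd : e.toNat ∣ i.toNat := by
      rw [← Int.natCast_dvd_natCast, Int.toNat_of_nonneg he0, hti]
      exact hed
    have hsq : e.toNat ≤ i.toNat.sqrt := by
      rw [Nat.le_sqrt]
      have : ((e.toNat * e.toNat : Nat) : Int) ≤ ((i.toNat : Nat) : Int) := by
        push_cast
        rw [Int.toNat_of_nonneg he0, hti]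
        exact hee
      exact_mod_cast this
    exact (Nat.prime_def_le_sqrt.mp hp).2 e.toNat (by omega) hsq hdvd

theorem pv_toChars_ne_nil (D : Int) : PySem.Int.toChars D ≠ [] := by
  unfold PySem.Int.toChars
  split
  · simp
  · exact List.ne_nil_of_length_pos Nat.length_toDigits_pos

theorem pv_isIn_one (D : Int) :
    (PySem.Str.isIn (PySem.Int.toStr D) (PySem.Int.toStr 1) = true) ↔ D = 1 := by
  constructor
  · intro h
    rw [PySem.Str.isIn_iff_infix, PySem.Int.toList_toStr, PySem.Int.toList_toStr,
      show PySem.Int.toChars 1 = ['1'] by decide] at h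
    rcases List.sublist_singleton.mp h.sublist with hnil | hone
    · exact absurd hnil (pv_toChars_ne_nil D)
    · unfold PySem.Int.toChars at hone
      split at hone
      · simp at hone
      · rename_i hneg
        have hle : (Nat.toDigits 10 D.toNat).length ≤ 1 := le_of_eq (by rw [hone]; rfl)
        have hlt : D.toNat < 10 := by
          have := (Nat.length_toDigits_le_iff (b := 10) (by norm_num) (by norm_num)).mp hle
          simpa using this
        rw [Nat.toDigits_of_lt_base hlt] at hone
        have hc : Nat.digitChar D.toNat = '1' := by
          injection hone
        have h1 : D.toNat = 1 := by
          interval_cases h : D.toNat <;> revert hc <;> decide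
        omega
  · rintro rfl
    decide

theorem pv_countP_diff (l : List Int) (p q : Int → Bool) (c : Int) (hl : l.Nodup)
    (h : ∀ i ∈ l, i ≠ c → p i = q i) (hq : q c = false) :
    (l.countP p : Int) = l.countP q + (if c ∈ l ∧ p c = true then 1 else 0) := by
  induction l with
  | nil => simp
  | cons x t ih =>
    have hx : x ∉ t := (List.nodup_cons.mp hl).1
    have ht : t.Nodup := (List.nodup_cons.mp hl).2
    rcases eq_or_ne x c with rfl | hxc
    · have hcnt : t.countP p = t.countP q :=
        List.countP_congr (fun i hi => by rw [h i (List.mem_cons_of_mem _ hi) (fun hic => hx (hic ▸ hi))])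
      rw [List.countP_cons, List.countP_cons, hcnt, hq,
        if_congr (show (x ∈ x :: t ∧ p x = true) ↔ (p x = true) by simp) rfl rfl]
      push_cast
      split_ifs <;> omega
    · have := ih ht (fun i hi hic => h i (List.mem_cons_of_mem _ hi) hic)
      rw [List.countP_cons, List.countP_cons, h x (List.mem_cons_self ..) hxc]
      have hmem : (c ∈ x :: t ∧ p c = true) ↔ (c ∈ t ∧ p c = true) := by
        simp [List.mem_cons, Ne.symm hxc]
      rw [if_congr hmem rfl rfl]
      push_cast
      push_cast at this
      split_ifs at this ⊢ <;> omega

theorem pv_countP_lo (A B : Int) (p : Int → Bool) (hlo : ∀ i : Int, i < 2 → p i = false) :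
    (PySem.List.pyRange (max A 2) (B + 1) 1).countP p
      = (PySem.List.pyRange A (B + 1) 1).countP p := by
  by_cases hA : 2 ≤ A
  · rw [max_eq_left hA]
  · rw [max_eq_right (by omega : A ≤ 2)]
    by_cases hB2 : 2 ≤ B + 1
    · have h1 : List.countP p (PySem.List.pyRange A 2 1) = 0 :=
        List.countP_eq_zero.mpr (fun i hi => by
          have := PySem.List.mem_pyRange_one.mp hi
          simp [hlo i (by omega)])
      rw [PySem.List.pyRange_one_append A 2 (B + 1) (by omega) hB2, List.countP_append, h1,
        Nat.zero_add]
    · rw [PySem.List.pyRange_one_eq_nil (by omega : (B + 1 : Int) ≤ 2), List.countP_nil,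
        Eq.comm, List.countP_eq_zero]
      intro i hi
      have := PySem.List.mem_pyRange_one.mp hi
      simp [hlo i (by omega)]

theorem pv_countP_restrict (A B : Int) (p : Int → Bool) (hneg : ∀ i : Int, i < 0 → p i = false) :
    (PySem.List.pyRange A (B + 1) 1).countP p
      = (PySem.List.pyRange 0 (B + 1) 1).countP (fun i => decide (A ≤ i) && p i) := by
  by_cases hA : A ≤ 0
  · by_cases hB1 : 0 ≤ B + 1
    · rw [PySem.List.pyRange_one_append A 0 (B + 1) hA hB1, List.countP_append,
        List.countP_eq_zero.mpr (fun i hi => by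
          have := PySem.List.mem_pyRange_one.mp hi
          simp [hneg i (by omega)]), Nat.zero_add]
      exact List.countP_congr (fun i hi => by
        have := PySem.List.mem_pyRange_one.mp hi
        simp [show A ≤ i by omega])
    · rw [PySem.List.pyRange_one_eq_nil (show (B + 1 : Int) ≤ 0 by omega)]
      simp only [List.countP_nil]
      exact List.countP_eq_zero.mpr (fun i hi => by
        have := PySem.List.mem_pyRange_one.mp hi
        simp [hneg i (by omega)])
  · by_cases hAB : A ≤ B + 1
    · have h1 : List.countP (fun i => decide (A ≤ i) && p i) (PySem.List.pyRange 0 A 1) = 0 :=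
        List.countP_eq_zero.mpr (fun i hi => by
          have := PySem.List.mem_pyRange_one.mp hi
          simp [show ¬ A ≤ i by omega])
      rw [PySem.List.pyRange_one_append 0 A (B + 1) (by omega) hAB, List.countP_append, h1,
        Nat.zero_add]
      exact (List.countP_congr (fun i hi => by
        have := PySem.List.mem_pyRange_one.mp hi
        simp [show A ≤ i by omega])).symm
    · have h1 : List.countP (fun i => decide (A ≤ i) && p i) (PySem.List.pyRange 0 (B + 1) 1) = 0 :=
        List.countP_eq_zero.mpr (fun i hi => by
          have := PySem.List.mem_pyRange_one.mp hi
          simp [show ¬ A ≤ i by omega])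
      rw [PySem.List.pyRange_one_eq_nil (show (B + 1 : Int) ≤ A by omega), h1]
      rfl

theorem pvB_eq_countP (D A B : Int) :
    find_prime_digit_alt D A B
      = ((PySem.List.pyRange (max A 2) (B + 1) 1).countP
          (fun i => pvIsPrime i && PySem.Str.isIn (PySem.Int.toStr D) (PySem.Int.toStr i)) : Int) := by
  simp only [find_prime_digit_alt]
  rw [PySem.List.foldl_if_add_one
    (fun i => pvIsPrime i && PySem.Str.isIn (PySem.Int.toStr D) (PySem.Int.toStr i)), zero_add]

theorem pvA_eq_countP (D A B : Int) (hB : 0 ≤ B) :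
    find_prime_digit D A B
      = ((PySem.List.pyRange 0 (B + 1) 1).countP
          (fun i => (decide (A ≤ i) && PySem.Str.isIn (PySem.Int.toStr D) (PySem.Int.toStr i)) &&
            decide (i.toNat = 1 ∨ Nat.Prime i.toNat)) : Int) := by
  unfold find_prime_digit
  rw [PySem.List.foldl_congr_mem _ _
    (fun cnt i => if (decide (A ≤ i) && PySem.Str.isIn (PySem.Int.toStr D) (PySem.Int.toStr i)) = true
      then cnt + 1 else cnt) 0
    (fun cnt i _ => by
      by_cases h1 : i < A
      · simp [if_pos h1, show ¬ A ≤ i by omega]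
      · by_cases h2 : PySem.Str.isIn (PySem.Int.toStr D) (PySem.Int.toStr i) = true <;>
          simp [if_neg h1, show A ≤ i by omega]),
    PySem.List.foldl_if_add_one]
  rw [show (0 : Int) + _ = _ from zero_add _]
  unfold eratos_prime
  rw [List.countP_filter]
  congr 1
  refine List.countP_congr (fun i hi => ?_)
  have hmem := PySem.List.mem_pyRange_one.mp hi
  have hsieve : (pvSieveLoop B (B + 1 - 2).toNat
        ((Array.replicate (B + 1).toNat true).setIfInBounds 0 false) 2).getD i.toNat false
      = decide (i.toNat = 1 ∨ Nat.Prime i.toNat) :=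
    pvSieve_char B hB i.toNat (by omega)
  rw [hsieve]

theorem pvMaster (D A B : Int) (hB : 0 ≤ B) :
    find_prime_digit D A B =
      find_prime_digit_alt D A B + (if D = 1 ∧ A ≤ 1 ∧ 1 ≤ B then 1 else 0) := by
  have hlo : ∀ i : Int, i < 2 →
      (pvIsPrime i && PySem.Str.isIn (PySem.Int.toStr D) (PySem.Int.toStr i)) = false := by
    intro i hi
    have h : pvIsPrime i = false := by
      unfold pvIsPrime
      rw [if_pos (show i < 2 by omega)]
    rw [h, Bool.false_and]
  rw [pvA_eq_countP D A B hB, pvB_eq_countP D A B, pv_countP_lo A B _ hlo,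
    pv_countP_restrict A B _ (fun i hi => hlo i (by omega))]
  rw [pv_countP_diff (PySem.List.pyRange 0 (B + 1) 1)
    (fun i => (decide (A ≤ i) && PySem.Str.isIn (PySem.Int.toStr D) (PySem.Int.toStr i)) &&
      decide (i.toNat = 1 ∨ Nat.Prime i.toNat))
    (fun i => decide (A ≤ i) &&
      (pvIsPrime i && PySem.Str.isIn (PySem.Int.toStr D) (PySem.Int.toStr i)))
    1 (PySem.List.nodup_pyRange_one 0 (B + 1))
    (fun i hi hne => by
      have hmem := PySem.List.mem_pyRange_one.mp hi
      have hmid : decide (i.toNat = 1 ∨ Nat.Prime i.toNat) = pvIsPrime i := by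
        by_cases h2 : 2 ≤ i
        · have hiff := pvIsPrime_iff i h2
          have hne1 : i.toNat ≠ 1 := by omega
          cases hpv : pvIsPrime i
          · refine decide_eq_false (fun hor => ?_)
            rcases hor with h | h
            · exact hne1 h
            · rw [hiff.mpr h] at hpv; cases hpv
          · exact decide_eq_true (Or.inr (hiff.mp hpv))
        · have hi0 : i = 0 := by omega
          subst hi0
          decide
      show ((decide (A ≤ i) && PySem.Str.isIn (PySem.Int.toStr D) (PySem.Int.toStr i)) &&
          decide (i.toNat = 1 ∨ Nat.Prime i.toNat))
        = (decide (A ≤ i) && (pvIsPrime i && PySem.Str.isIn (PySem.Int.toStr D) (PySem.Int.toStr i)))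
      rw [← hmid]
      cases decide (A ≤ i) <;> cases PySem.Str.isIn (PySem.Int.toStr D) (PySem.Int.toStr i) <;>
        cases decide (i.toNat = 1 ∨ Nat.Prime i.toNat) <;> rfl)
    (by simp [show pvIsPrime 1 = false from rfl])]
  congr 1
  have hiff : ((1 : Int) ∈ PySem.List.pyRange 0 (B + 1) 1 ∧
      ((decide (A ≤ (1 : Int)) && PySem.Str.isIn (PySem.Int.toStr D) (PySem.Int.toStr 1)) &&
        decide ((1 : Int).toNat = 1 ∨ Nat.Prime (1 : Int).toNat)) = true)
      ↔ (D = 1 ∧ A ≤ 1 ∧ 1 ≤ B) := by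
    rw [PySem.List.mem_pyRange_one]
    simp only [Bool.and_eq_true, decide_eq_true_eq, pv_isIn_one]
    constructor
    · rintro ⟨⟨_, hlt⟩, ⟨hA1, hD⟩, _⟩
      exact ⟨hD, hA1, by omega⟩
    · rintro ⟨hD, hA1, hB1⟩
      exact ⟨⟨by norm_num, by omega⟩, ⟨hA1, hD⟩, by norm_num⟩
  by_cases hc : D = 1 ∧ A ≤ 1 ∧ 1 ≤ B
  · rw [if_pos (hiff.mpr hc), if_pos hc]
  · rw [if_neg (fun h => hc (hiff.mp h)), if_neg hc]

-- ===== VERDICT (by name: the statement is the Claim_ definition above) =====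
theorem find_prime_digit_spec : Claim_unchanged_find_prime_digit := by
  intro D A B _hDom hPre hnD
  rw [pvMaster D A B hPre, if_neg (by unfold D_find_prime_digit at hnD; exact hnD), add_zero]

theorem find_prime_digit_changed : Claim_changed_find_prime_digit := by
  unfold Claim_changed_find_prime_digit; decide

theorem find_prime_digit_tight : Claim_exact_find_prime_digit := by
  intro D A B _hDom hPre hD
  rw [pvMaster D A B hPre, if_pos (by unfold D_find_prime_digit at hD; exact hD)]
  omega
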